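-- pv_equiv track=rewrite | github.com/dbspgnl/CodingTest_Python | 연습/2308_3/0815_2.py | solution
-- ===== SOURCE A (Python) =====
-- import heapq
--
-- def solution(A, B):
--     answer = []
--     A = [-a for a in A]
--     B = [-b for b in B]
--     heapq.heapify(A)
--     heapq.heapify(B)
--     for _ in range(len(B)):
--         a_max = heapq.heappop(A)
--         b_max = heapq.heappop(B)
--         if b_max < a_max: #이기면
--             answer.append(b_max) # AB버리고, 결과만 담는다.
--         else:
--             heapq.heappush(B, b_max) # 지면 재활용한다.
--     return len(answer)
-- ===== SOURCE B (Python) =====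
-- def solution(A, B):
--     B_desc = sorted(B, reverse=True)
--     count = 0
--     j = 0
--     for a in sorted(A, reverse=True)[:len(B)]:
--         if B_desc[j] > a:
--             count += 1
--             j += 1
--     return count
-- ===== Notes on version B (the rewrite author's own statement) =====
-- stated objective: simpler
-- what changed: Replaces the two max-heaps (pop both maxes each round, push B's max back on a loss) by sorting both lists descending once and counting wins with a single two-pointer pass; same O(n log n) but no per-iteration heap pops/push-backs.
import Mathlib
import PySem

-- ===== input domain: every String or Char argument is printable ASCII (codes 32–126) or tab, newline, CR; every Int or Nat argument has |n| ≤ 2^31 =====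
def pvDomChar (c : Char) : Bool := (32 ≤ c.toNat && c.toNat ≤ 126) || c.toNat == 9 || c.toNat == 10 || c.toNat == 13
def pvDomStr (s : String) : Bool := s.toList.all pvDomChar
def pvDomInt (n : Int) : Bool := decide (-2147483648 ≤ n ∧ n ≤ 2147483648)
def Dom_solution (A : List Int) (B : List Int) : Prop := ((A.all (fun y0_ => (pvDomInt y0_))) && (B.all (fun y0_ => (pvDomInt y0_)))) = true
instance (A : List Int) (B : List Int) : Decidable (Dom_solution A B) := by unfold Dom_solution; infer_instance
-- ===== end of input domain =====

-- B replaces the two heaps (pop both maxes, push B's back on a loss) by one pass of two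
-- pointers over both lists sorted descending once — simpler, no re-insertion. (objective: simpler)

-- ===== PORT A =====
-- heapq is modelled by its multiset contract (exact for Int contents, which is all the
-- program observes): heapify keeps the contents, heappop removes and returns the smallest.
def heappop? (h : List Int) : Option (Int × List Int) :=
  match PySem.List.min? h (fun x => x) with
  | none => none               -- IndexError: pop from empty heap
  | some m => some (m, h.erase m)

def solLoop : Nat → List Int → List Int → List Int → Option (List Int)
  | 0, answer, _, _ => some answer
  | n + 1, answer, hA, hB =>
    match heappop? hA, heappop? hB with
    | some (aMax, hA'), some (bMax, hB') =>
      if bMax < aMax then solLoop n (answer ++ [bMax]) hA' hB'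
      else solLoop n answer hA' (hB' ++ [bMax])
    | _, _ => none             -- IndexError (only when len B > len A; excluded by Pre_)

def solution (A : List Int) (B : List Int) : Int :=
  match solLoop B.length [] (A.map (fun a => -a)) (B.map (fun b => -b)) with
  | some answer => (answer.length : Int)
  | none => 0                  -- unreachable under Pre_

-- ===== PORT B =====
def solution_alt (A : List Int) (B : List Int) : Int :=
  (PySem.List.slice (PySem.List.sorted A (fun x => x) true) none (some (PySem.List.len B))
      |>.foldl
        (fun (st : Int × Int) a =>
          -- B_desc[j]: j stays within range on every reachable state (proved below)
          if PySem.List.pyGetD (PySem.List.sorted B (fun x => x) true) st.2 0 > a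
          then (st.1 + 1, st.2 + 1) else st)
        (0, 0)).1

-- ===== PRECONDITION & SPEC =====
-- A pops from heap A on each of len(B) iterations, so it raises IndexError iff len(B) > len(A).
def Pre_solution (A : List Int) (B : List Int) : Prop := B.length ≤ A.length
instance (A : List Int) (B : List Int) : Decidable (Pre_solution A B) := by unfold Pre_solution; infer_instance
def pvWitness_solution : List Int × List Int := ([3, 1], [2])
def Spec_solution (A : List Int) (B : List Int) (out : Int) : Prop := out = solution_alt A B
instance (A : List Int) (B : List Int) (out : Int) : Decidable (Spec_solution A B out) := by unfold Spec_solution; infer_instance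

-- ===== CLAIM (what is proved, stated in full; the proofs are below) =====
def Claim_equal_solution : Prop := ∀ (A : List Int) (B : List Int), Dom_solution A B → Pre_solution A B → Spec_solution A B (solution A B)

-- ===== LEMMAS AND PROOFS =====

-- Reference: two-pointer count on two descending lists (first list = the fuel).
def tp : List Int → List Int → Nat
  | a :: sa, b :: sb => if a < b then tp sa sb + 1 else tp sa (b :: sb)
  | _, _ => 0

lemma tp_cons (a b : Int) (sa sb : List Int) :
    tp (a :: sa) (b :: sb) = if a < b then tp sa sb + 1 else tp sa (b :: sb) := rfl

-- heappop? on a permutation of x :: xs where x is a lower bound pops exactly x.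
lemma heappop?_eq (x : Int) (xs h : List Int) (hp : h.Perm (x :: xs))
    (hmin : ∀ y ∈ x :: xs, x ≤ y) :
    heappop? h = some (x, h.erase x) ∧ (h.erase x).Perm xs := by
  have hne : h ≠ [] := by
    intro h0; subst h0; exact (List.not_mem_nil (a := x)) (hp.symm.mem_iff.mp (by simp))
  obtain ⟨m, hm⟩ : ∃ m, PySem.List.min? h (fun x => x) = some m := by
    cases hmo : PySem.List.min? h (fun x => x) with
    | none => exact absurd ((PySem.List.min?_eq_none_iff _ _).mp hmo) hne
    | some m => exact ⟨m, rfl⟩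
  have hmem : m ∈ h := PySem.List.min?_mem hm
  have hmx : m = x := by
    have h1 : m ≤ x := PySem.List.min?_isMin hm x (hp.symm.mem_iff.mp (by simp))
    have h2 : x ≤ m := hmin m (hp.mem_iff.mp hmem)
    omega
  subst hmx
  refine ⟨by simp [heappop?, hm], ?_⟩
  have := hp.erase m
  simpa using this

-- The heap loop counts exactly the two-pointer wins on the sorted views.
lemma solLoop_tp : ∀ (n : Nat) (sa sb hA hB answer : List Int),
    sa.Pairwise (fun x y => y ≤ x) → sb.Pairwise (fun x y => y ≤ x) →
    hA.Perm (sa.map (fun a => -a)) → hB.Perm (sb.map (fun b => -b)) →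
    n ≤ sa.length → n ≤ sb.length →
    ∃ l, solLoop n answer hA hB = some l ∧ l.length = answer.length + tp (sa.take n) sb := by
  intro n
  induction n with
  | zero => intro sa sb hA hB answer _ _ _ _ _ _; exact ⟨answer, rfl, by simp [tp]⟩
  | succ n ih =>
    intro sa sb hA hB answer hsa hsb hpA hpB hna hnb
    match sa, sb with
    | [], _ => simp at hna
    | _ :: _, [] => simp at hnb
    | a :: sa', b :: sb' =>
      have hamin : ∀ y ∈ ((a :: sa').map (fun a => -a)), -a ≤ y := by
        intro y hy
        simp only [List.mem_map] at hy
        obtain ⟨z, hz, rfl⟩ := hy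
        rcases List.mem_cons.mp hz with rfl | hz2
        · omega
        · have := (List.pairwise_cons.mp hsa).1 z hz2; omega
      have hbmin : ∀ y ∈ ((b :: sb').map (fun b => -b)), -b ≤ y := by
        intro y hy
        simp only [List.mem_map] at hy
        obtain ⟨z, hz, rfl⟩ := hy
        rcases List.mem_cons.mp hz with rfl | hz2
        · omega
        · have := (List.pairwise_cons.mp hsb).1 z hz2; omega
      have hA' := heappop?_eq (-a) (sa'.map (fun a => -a)) hA (by simpa using hpA) (by simpa using hamin)
      have hB' := heappop?_eq (-b) (sb'.map (fun b => -b)) hB (by simpa using hpB) (by simpa using hbmin)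
      rw [show solLoop (n + 1) answer hA hB =
          (match heappop? hA, heappop? hB with
           | some (aMax, hA'), some (bMax, hB') =>
             if bMax < aMax then solLoop n (answer ++ [bMax]) hA' hB'
             else solLoop n answer hA' (hB' ++ [bMax])
           | _, _ => none) from rfl, hA'.1, hB'.1]
      simp only []
      by_cases hw : a < b
      · rw [if_pos (by omega)]
        obtain ⟨l, hl, hlen⟩ := ih sa' sb' (hA.erase (-a)) (hB.erase (-b)) (answer ++ [-b])
          (List.pairwise_cons.mp hsa).2 (List.pairwise_cons.mp hsb).2 hA'.2 hB'.2
          (by simp only [List.length_cons] at hna ⊢; omega) (by simp only [List.length_cons] at hnb ⊢; omega)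
        refine ⟨l, hl, ?_⟩
        rw [List.take_succ_cons, tp_cons, if_pos hw]
        simp only [List.length_append, List.length_cons, List.length_nil] at hlen
        omega
      · rw [if_neg (by omega)]
        have hpB2 : ((hB.erase (-b)) ++ [-b]).Perm ((b :: sb').map (fun b => -b)) :=
          (hB'.2.append_right [-b]).trans (List.perm_append_singleton (-b) (sb'.map (fun b => -b)))
        obtain ⟨l, hl, hlen⟩ := ih sa' (b :: sb') (hA.erase (-a)) (hB.erase (-b) ++ [-b]) answer
          (List.pairwise_cons.mp hsa).2 hsb hA'.2 hpB2
          (by simp only [List.length_cons] at hna ⊢; omega) (by simp only [List.length_cons] at hnb ⊢; omega)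
        refine ⟨l, hl, ?_⟩
        rw [List.take_succ_cons, tp_cons, if_neg hw]
        exact hlen

-- B's indexed scan over B_desc equals the two-pointer count on the dropped suffix.
lemma foldlB (Bd : List Int) : ∀ (L : List Int) (c : Int) (j : Nat), j + L.length ≤ Bd.length →
    L.foldl (fun (st : Int × Int) a =>
        if PySem.List.pyGetD Bd st.2 0 > a then (st.1 + 1, st.2 + 1) else st) (c, (j : Int))
      = (c + (tp L (Bd.drop j) : Int), (j : Int) + (tp L (Bd.drop j) : Int)) := by
  intro L
  induction L with
  | nil => intro c j _; simp [tp]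
  | cons a L' ih =>
    intro c j hlen
    have hj : j < Bd.length := by simp only [List.length_cons] at hlen; omega
    have hdrop : Bd.drop j = Bd[j] :: Bd.drop (j + 1) := List.drop_eq_getElem_cons hj
    have hget : PySem.List.pyGetD Bd (j : Int) 0 = Bd[j] := by
      rw [PySem.List.pyGetD_natCast]; exact List.getD_eq_getElem Bd 0 hj
    rw [List.foldl_cons]
    simp only [hget, hdrop, tp_cons]
    by_cases hw : a < Bd[j]
    · rw [if_pos hw, if_pos hw]
      have : ((j : Int) + 1) = ((j + 1 : Nat) : Int) := by push_cast; ring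
      rw [this, ih (c + 1) (j + 1) (by simp only [List.length_cons] at hlen; omega)]
      simp only [Prod.mk.injEq]
      omega
    · rw [if_neg hw, if_neg hw]
      rw [ih c j (by simp only [List.length_cons] at hlen; omega), ← hdrop]

-- Both sides equal the two-pointer count tp on the descending sorted views.
lemma solution_alt_eq_tp (A B : List Int) :
    solution_alt A B = (tp ((PySem.List.sorted A (fun x => x) true).take B.length)
      (PySem.List.sorted B (fun x => x) true) : Int) := by
  unfold solution_alt
  rw [show PySem.List.len B = ((B.length : Nat) : Int) by simp [PySem.List.len_eq],
      PySem.List.slice_to_natCast]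
  rw [show ((0 : Int), (0 : Int)) = ((0 : Int), ((0 : Nat) : Int)) by norm_num,
      foldlB _ _ 0 0 (by
        simp only [List.length_take, PySem.List.length_sorted, Nat.zero_add]
        omega)]
  simp

lemma solution_eq_tp (A B : List Int) (hpre : B.length ≤ A.length) :
    solution A B = (tp ((PySem.List.sorted A (fun x => x) true).take B.length)
      (PySem.List.sorted B (fun x => x) true) : Int) := by
  obtain ⟨l, hl, hlen⟩ := solLoop_tp B.length
    (PySem.List.sorted A (fun x => x) true) (PySem.List.sorted B (fun x => x) true)
    (A.map (fun a => -a)) (B.map (fun b => -b)) []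
    (by simpa using PySem.List.sorted_pairwise_rev A (fun x => x))
    (by simpa using PySem.List.sorted_pairwise_rev B (fun x => x))
    (((PySem.List.sorted_perm A (fun x => x) true).map (fun a => -a)).symm)
    (((PySem.List.sorted_perm B (fun x => x) true).map (fun b => -b)).symm)
    (by rw [PySem.List.length_sorted]; exact hpre)
    (by rw [PySem.List.length_sorted])
  unfold solution
  rw [hl]
  simp only [List.length_nil, Nat.zero_add] at hlen
  exact_mod_cast congrArg (Int.ofNat) hlen

-- ===== VERDICT (by name: the statement is the Claim_ definition above) =====
theorem solution_spec : Claim_equal_solution := by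
  intro A B _ hpre
  unfold Spec_solution
  rw [solution_eq_tp A B hpre, solution_alt_eq_tp]
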